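-- pv_equiv track=rewrite | github.com/ShikhaMaurya212402/Introduction-to-Python-Infosys-Springboard- | attendancetracker.py | longest_present_streak
-- ===== SOURCE A (Python) =====
-- def longest_present_streak(attendance):
--     current_streak = {}
--     max_streak = {}
--
--     for record in attendance:
--         name = record[0]
--         status = record[2]
--
--         if name not in current_streak:
--             current_streak[name] = 0
--             max_streak[name] = 0
--
--         if status == "Present":
--             current_streak[name] += 1
--             if current_streak[name] > max_streak[name]:
--                 max_streak[name] = current_streak[name]
--         else:
--             current_streak[name] = 0
--
--     return max_streak
-- ===== SOURCE B (Python) =====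
-- def longest_present_streak(attendance):
--     # Phase 1: group statuses per name, in record order.
--     groups = {}
--     for rec in attendance:
--         groups.setdefault(rec[0], []).append(rec[2])
--     # Phase 2: per name, longest run of "Present".
--     result = {}
--     for name, statuses in groups.items():
--         best = 0
--         cur = 0
--         for s in statuses:
--             cur = cur + 1 if s == "Present" else 0
--             if cur > best:
--                 best = cur
--         result[name] = best
--     return result
-- ===== Notes on version B (the rewrite author's own statement) =====
-- stated objective: alternative
-- what changed: B splits A's single interleaved fold over two parallel dicts into two phases: group each name's statuses into a dict of lists, then scan each group once with a plain best/cur pair.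
import Mathlib
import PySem

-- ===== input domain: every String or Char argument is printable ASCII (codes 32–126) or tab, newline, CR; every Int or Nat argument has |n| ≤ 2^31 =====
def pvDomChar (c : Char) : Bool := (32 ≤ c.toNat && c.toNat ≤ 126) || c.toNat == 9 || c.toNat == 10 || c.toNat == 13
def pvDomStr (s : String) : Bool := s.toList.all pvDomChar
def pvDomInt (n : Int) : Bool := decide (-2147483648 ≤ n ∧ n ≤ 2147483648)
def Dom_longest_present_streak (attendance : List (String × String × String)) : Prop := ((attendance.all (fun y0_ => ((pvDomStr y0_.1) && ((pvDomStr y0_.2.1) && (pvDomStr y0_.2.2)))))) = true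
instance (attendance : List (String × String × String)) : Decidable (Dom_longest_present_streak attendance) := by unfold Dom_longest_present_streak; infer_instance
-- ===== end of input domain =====

-- B replaces A's single interleaved fold over two parallel dicts by two phases (group statuses per name, then scan each group); same cost, alternative decomposition.

-- ===== PORT A =====
-- loop body of A's single pass over the records (state: current_streak, max_streak)
def pvAStep (st : PySem.Dict String Int × PySem.Dict String Int) (r : String × String × String) :
    PySem.Dict String Int × PySem.Dict String Int :=
  let name := r.1
  let status := r.2.2
  let st' := if st.1.contains name then st else (st.1.insert name 0, st.2.insert name 0)
  let cur := st'.1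
  let mx := st'.2
  if status = "Present" then
    -- current_streak[name] += 1: the key is always present here (ensured just above), so getD's default is never used
    let cur' := cur.insert name (cur.getD name 0 + 1)
    if cur'.getD name 0 > mx.getD name 0 then (cur', mx.insert name (cur'.getD name 0)) else (cur', mx)
  else
    (cur.insert name 0, mx)

def longest_present_streak (attendance : List (String × String × String)) : List (String × Int) :=
  (attendance.foldl pvAStep (PySem.Dict.empty, PySem.Dict.empty)).2.items

-- ===== PORT B =====
-- inner-loop body of B's per-name scan (state: best, cur)
def pvBStep (p : Int × Int) (s : String) : Int × Int :=
  let cur := if s = "Present" then p.2 + 1 else 0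
  (if cur > p.1 then cur else p.1, cur)

def longest_present_streak_alt (attendance : List (String × String × String)) : List (String × Int) :=
  let groups : PySem.Dict String (List String) :=
    attendance.foldl (fun d r => d.modify r.1 [] (· ++ [r.2.2])) PySem.Dict.empty
  let result : PySem.Dict String Int :=
    groups.items.foldl (fun d p => d.insert p.1 (p.2.foldl pvBStep (0, 0)).1) PySem.Dict.empty
  result.items

-- ===== PRECONDITION & SPEC =====
def Spec_longest_present_streak (attendance : List (String × String × String)) (out : List (String × Int)) : Prop := out = longest_present_streak_alt attendance
instance (attendance : List (String × String × String)) (out : List (String × Int)) : Decidable (Spec_longest_present_streak attendance out) := by unfold Spec_longest_present_streak; infer_instance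

-- ===== CLAIM (what is proved, stated in full; the proofs are below) =====
def Claim_equal_longest_present_streak : Prop := ∀ (attendance : List (String × String × String)), Dom_longest_present_streak attendance → Spec_longest_present_streak attendance (longest_present_streak attendance)

-- ===== LEMMAS AND PROOFS =====

-- names in first-occurrence order, and the status list of one name
def pvNames (l : List (String × String × String)) : List String :=
  PySem.Set.ofList (l.map (·.1))

def pvStats (n : String) (l : List (String × String × String)) : List String :=
  (l.filter (fun r => r.1 == n)).map (fun r => r.2.2)

def pvPair (sts : List String) : Int × Int := sts.foldl pvBStep (0, 0)

lemma pvPair_nonneg_aux (sts : List String) (p : Int × Int) (h1 : 0 ≤ p.1) (h2 : 0 ≤ p.2) :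
    0 ≤ (sts.foldl pvBStep p).1 ∧ 0 ≤ (sts.foldl pvBStep p).2 := by
  induction sts generalizing p with
  | nil => exact ⟨h1, h2⟩
  | cons s sts ih =>
      simp only [List.foldl_cons]
      apply ih
      · simp only [pvBStep]; split_ifs <;> omega
      · simp only [pvBStep]; split_ifs <;> omega

lemma pvPair_nonneg (sts : List String) : 0 ≤ (pvPair sts).1 ∧ 0 ≤ (pvPair sts).2 :=
  pvPair_nonneg_aux sts (0, 0) (by norm_num) (by norm_num)

lemma pvPair_append (sts : List String) (s : String) :
    pvPair (sts ++ [s]) =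
      if s = "Present" then
        (if (pvPair sts).2 + 1 > (pvPair sts).1 then (pvPair sts).2 + 1 else (pvPair sts).1,
         (pvPair sts).2 + 1)
      else ((pvPair sts).1, 0) := by
  have hm := (pvPair_nonneg sts).1
  simp only [pvPair] at hm ⊢
  simp only [List.foldl_append, List.foldl_cons, List.foldl_nil, pvBStep]
  split_ifs <;> try rfl
  all_goals (exfalso; omega)

lemma pvStats_append (n : String) (l : List (String × String × String)) (r : String × String × String) :
    pvStats n (l ++ [r]) = pvStats n l ++ (if r.1 == n then [r.2.2] else []) := by
  simp only [pvStats, List.filter_append, List.map_append]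
  by_cases h : r.1 == n <;> simp [h]

lemma pvStats_nil_of_not_mem (n : String) (l : List (String × String × String))
    (h : n ∉ l.map (·.1)) : pvStats n l = [] := by
  simp only [pvStats, List.map_eq_nil_iff, List.filter_eq_nil_iff]
  intro r hr
  simp only [beq_iff_eq]
  intro he
  exact h (List.mem_map.mpr ⟨r, hr, he⟩)

lemma pvNames_append (l : List (String × String × String)) (r : String × String × String) :
    pvNames (l ++ [r]) = PySem.Set.add (pvNames l) r.1 := by
  simp [pvNames, PySem.Set.ofList_append_singleton]

-- the grouping phase of B accumulates exactly pvStats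
lemma pvGroup_getD (l : List (String × String × String)) (d : PySem.Dict String (List String)) (n : String) :
    (l.foldl (fun d r => d.modify r.1 [] (· ++ [r.2.2])) d).getD n [] = d.getD n [] ++ pvStats n l := by
  induction l generalizing d with
  | nil => simp [pvStats]
  | cons r l ih =>
      simp only [List.foldl_cons, ih, PySem.Dict.getD_modify]
      by_cases h : n = r.1
      · subst h; simp [pvStats]
      · have : (r.1 == n) = false := by simp [Ne.symm h]
        simp [pvStats, this, h]

-- A's fold state after any prefix, characterised per name
lemma pvA_inv (l : List (String × String × String)) :
    (l.foldl pvAStep (PySem.Dict.empty, PySem.Dict.empty)).1.items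
      = (pvNames l).map (fun n => (n, (pvPair (pvStats n l)).2)) ∧
    (l.foldl pvAStep (PySem.Dict.empty, PySem.Dict.empty)).2.items
      = (pvNames l).map (fun n => (n, (pvPair (pvStats n l)).1)) := by
  induction l using List.reverseRecOn with
  | nil => constructor <;> simp [pvNames, PySem.Set.ofList_nil, PySem.Dict.empty]
  | append_singleton l r ih =>
      obtain ⟨ih1, ih2⟩ := ih
      rw [List.foldl_append, List.foldl_cons, List.foldl_nil]
      set st := l.foldl pvAStep (PySem.Dict.empty, PySem.Dict.empty) with hst
      set N := pvNames l with hNdef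
      set c := (pvPair (pvStats r.1 l)).2 with hcdef
      set m := (pvPair (pvStats r.1 l)).1 with hmdef
      have hnd : N.Nodup := PySem.Set.nodup_ofList _
      have hk1 : st.1.keys = N := by simp [PySem.Dict.keys, ih1, List.map_map, Function.comp_def]
      have hk2 : st.2.keys = N := by simp [PySem.Dict.keys, ih2, List.map_map, Function.comp_def]
      have hstats_ne : ∀ n, n ≠ r.1 → pvStats n (l ++ [r]) = pvStats n l := by
        intro n h
        rw [pvStats_append]
        simp [show (r.1 == n) = false by simp [Ne.symm h]]
      have hstats_eq : pvStats r.1 (l ++ [r]) = pvStats r.1 l ++ [r.2.2] := by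
        rw [pvStats_append]; simp
      by_cases hmem : r.1 ∈ N
      · -- the name was seen before
        have hNs : pvNames (l ++ [r]) = N := by
          rw [pvNames_append, ← hNdef, PySem.Set.add_of_mem hmem]
        have hc1 : st.1.contains r.1 = true := by
          rw [PySem.Dict.contains_eq_decide_mem_keys, hk1]; simp [hmem]
        have hmem1 : (r.1, c) ∈ st.1.items := by rw [ih1]; exact List.mem_map_of_mem hmem
        have hmem2 : (r.1, m) ∈ st.2.items := by rw [ih2]; exact List.mem_map_of_mem hmem
        have hgd1 : st.1.getD r.1 0 = c := PySem.Dict.getD_of_mem_items st.1 hmem1 (hk1 ▸ hnd) 0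
        have hgd2 : st.2.getD r.1 0 = m := PySem.Dict.getD_of_mem_items st.2 hmem2 (hk2 ▸ hnd) 0
        by_cases hs : r.2.2 = "Present"
        · have e1 : pvAStep st r
              = (st.1.insert r.1 (c + 1), if c + 1 > m then st.2.insert r.1 (c + 1) else st.2) := by
            simp only [pvAStep, hc1, hs, PySem.Dict.getD_insert_self]
            simp [hgd1, hgd2]
            split_ifs <;> rfl
          rw [e1]
          constructor
          · rw [hNs, PySem.Dict.items_insert_of_contains st.1 _ hc1, ih1, List.map_map]
            apply List.map_congr_left; intro n hn
            by_cases h : n = r.1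
            · subst h; simp [hstats_eq, pvPair_append, hs, ← hcdef]
            · simp [hstats_ne n h, h]
          · by_cases hcmp : c + 1 > m
            · rw [if_pos hcmp, hNs, PySem.Dict.items_insert_of_contains st.2 _ (by
                rw [PySem.Dict.contains_eq_decide_mem_keys, hk2]; simp [hmem]), ih2, List.map_map]
              apply List.map_congr_left; intro n hn
              by_cases h : n = r.1
              · subst h
                simp only [hstats_eq, pvPair_append, hs, if_pos, ← hcdef, ← hmdef]
                simp [hcmp]
              · have hb : (n == r.1) = false := by simp [h]
                simp [hstats_ne n h, h]
            · rw [if_neg hcmp, hNs, ih2]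
              apply List.map_congr_left; intro n hn
              by_cases h : n = r.1
              · subst h
                simp only [hstats_eq, pvPair_append, hs, ← hcdef, ← hmdef]
                simp [hcmp]
              · rw [hstats_ne n h]
        · have e2 : pvAStep st r = (st.1.insert r.1 0, st.2) := by
            simp [pvAStep, hc1, hs]
          rw [e2]
          constructor
          · rw [hNs, PySem.Dict.items_insert_of_contains st.1 _ hc1, ih1, List.map_map]
            apply List.map_congr_left; intro n hn
            by_cases h : n = r.1
            · subst h; simp [hstats_eq, pvPair_append, hs]
            · simp [hstats_ne n h, h]
          · rw [hNs, ih2]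
            apply List.map_congr_left; intro n hn
            by_cases h : n = r.1
            · subst h; simp [hstats_eq, pvPair_append, hs, ← hmdef]
            · rw [hstats_ne n h]
      · -- a fresh name
        have hNs : pvNames (l ++ [r]) = N ++ [r.1] := by
          rw [pvNames_append, ← hNdef, PySem.Set.add_of_not_mem hmem]
        have hc0 : st.1.contains r.1 = false := by
          rw [PySem.Dict.contains_eq_decide_mem_keys, hk1]; simp [hmem]
        have hc2 : st.2.contains r.1 = false := by
          rw [PySem.Dict.contains_eq_decide_mem_keys, hk2]; simp [hmem]
        have hstats0 : pvStats r.1 l = [] := by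
          apply pvStats_nil_of_not_mem
          intro h
          exact hmem (by rw [hNdef, pvNames]; exact (PySem.Set.mem_ofList _ _).mpr h)
        have hfresh : ∀ n ∈ N, n ≠ r.1 := by
          intro n hn h; exact hmem (h ▸ hn)
        by_cases hs : r.2.2 = "Present"
        · have e3 : pvAStep st r = (st.1.insert r.1 1, st.2.insert r.1 1) := by
            simp [pvAStep, hc0, hs, PySem.Dict.getD_insert_self, PySem.Dict.insert_insert_self]
          rw [e3]
          constructor
          · rw [hNs, PySem.Dict.items_insert_of_not_contains st.1 _ hc0, ih1,
                List.map_append, List.map_singleton]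
            congr 1
            · apply List.map_congr_left; intro n hn
              rw [hstats_ne n (hfresh n hn)]
            · rw [hstats_eq, hstats0]
              simp [pvPair, pvBStep, hs]
          · rw [hNs, PySem.Dict.items_insert_of_not_contains st.2 _ hc2, ih2,
                List.map_append, List.map_singleton]
            congr 1
            · apply List.map_congr_left; intro n hn
              rw [hstats_ne n (hfresh n hn)]
            · rw [hstats_eq, hstats0]
              simp [pvPair, pvBStep, hs]
        · have e4 : pvAStep st r = (st.1.insert r.1 0, st.2.insert r.1 0) := by
            simp [pvAStep, hc0, hs, PySem.Dict.insert_insert_self]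
          rw [e4]
          constructor
          · rw [hNs, PySem.Dict.items_insert_of_not_contains st.1 _ hc0, ih1,
                List.map_append, List.map_singleton]
            congr 1
            · apply List.map_congr_left; intro n hn
              rw [hstats_ne n (hfresh n hn)]
            · rw [hstats_eq, hstats0]
              simp [pvPair, pvBStep, hs]
          · rw [hNs, PySem.Dict.items_insert_of_not_contains st.2 _ hc2, ih2,
                List.map_append, List.map_singleton]
            congr 1
            · apply List.map_congr_left; intro n hn
              rw [hstats_ne n (hfresh n hn)]
            · rw [hstats_eq, hstats0]
              simp [pvPair, pvBStep, hs]

lemma pvB_char (l : List (String × String × String)) :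
    longest_present_streak_alt l = (pvNames l).map (fun n => (n, (pvPair (pvStats n l)).1)) := by
  set groups := l.foldl (fun d r => d.modify r.1 [] (· ++ [r.2.2])) PySem.Dict.empty with hg
  have hkeys : groups.keys = pvNames l := by
    rw [hg, PySem.Dict.keys_foldl_modify_key l (fun r => r.1) [] (fun _ r v => v ++ [r.2.2])
          PySem.Dict.empty]
    simp [pvNames, PySem.Set.update_nil_left, PySem.Dict.keys_empty]
  have hnodup : groups.keys.Nodup := by rw [hkeys]; exact PySem.Set.nodup_ofList _
  have hitems : groups.items = (pvNames l).map (fun n => (n, pvStats n l)) := by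
    rw [PySem.Dict.items_eq_map_keys groups hnodup [], hkeys]
    apply List.map_congr_left
    intro n hn
    rw [hg, pvGroup_getD]
    simp [PySem.Dict.getD_empty]
  have hmain : (groups.items.foldl
      (fun d p => d.insert p.1 (p.2.foldl pvBStep (0, 0)).1) PySem.Dict.empty).items
      = (pvNames l).map (fun n => (n, (pvPair (pvStats n l)).1)) := by
    rw [PySem.Dict.items_foldl_insert_fresh groups.items (fun p => p.1)
          (fun p => (p.2.foldl pvBStep (0, 0)).1) PySem.Dict.empty
          (fun a _ => PySem.Dict.contains_empty _) (by exact hnodup)]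
    rw [hitems, List.map_map]
    simp [pvPair, PySem.Dict.empty]
  simpa [longest_present_streak_alt, hg] using hmain

-- ===== VERDICT (by name: the statement is the Claim_ definition above) =====
theorem longest_present_streak_spec : Claim_equal_longest_present_streak := by
  intro attendance _
  unfold Spec_longest_present_streak longest_present_streak
  rw [(pvA_inv attendance).2, pvB_char]
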